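/- GENERATED by tools/mkcompositions.py from design/units.gif.tsv (unit `gif_decode.COMPOSITION`) — do not edit.
   THE PROOF of the composition unit `gif_decode.COMPOSITION`: the 7 segments of `gif_decode` chain into its contract, by the theorem
   `Gif.Spec.gif_decode.compose` (proved next to the cut assertions). -/
import Gif.Spec.Units.gif_decode_COMPOSITION

/-- The segments of `gif_decode` compose into its contract. -/
theorem Gif.Spec.Proved.gif_decode_COMPOSITION_ok : Gif.Spec.gif_decode_COMPOSITION.Statement := by
  intro Lay _hLay μ _hμ u₀ h_gif_decode_P h_gif_decode_1 h_gif_decode_2 h_gif_decode_3 h_gif_decode_4 h_gif_decode_5 h_gif_decode_E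
  apply Gif.Spec.gif_decode.compose
  all_goals assumption
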